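-- pv_equiv track=rewrite | github.com/ecwisniewski/AdventOfCode2024 | day5.py | check_page_follows_rules
-- ===== SOURCE A (Python) =====
-- def find_middle_values(instr):
--     index = int(len(instr) / 2)
--     return index, instr[index]
--
-- def correct_pages(i0,i1, pages):
--     t = pages[i0]
--     pages[i0]=pages[i1]
--     pages[i1] = t
--
-- def check_page_follows_rules(rules, pages,flag=True):
--     for r in rules:
--         pg1 = pages.index(r[0]) if r[0] in pages else -1
--         pg2 = pages.index(r[1]) if r[1] in pages else -1
--
--         if pg1 > pg2 and (pg2 != -1 and pg1 != -1):
--             # The second page is first and therefore wrong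
--             correct_pages(pg1,pg2,pages)
--             return check_page_follows_rules(rules, pages,False)
--
--     i,val = find_middle_values(pages)
--     if flag:
--         return -1
--     return int(val)
-- ===== SOURCE B (Python) =====
-- # B: iterative fixpoint with a first-occurrence position dict rebuilt per pass
-- # (one O(P+R) pass per swap instead of A's O(R*P) .index/membership scans, recursion -> loop).
-- # Like A, mutates `pages` in place (same sequence of swaps).
-- def check_page_follows_rules(rules, pages, flag=True):
--     while True:
--         pos = {}
--         for i, p in enumerate(pages):
--             if p not in pos:
--                 pos[p] = i
--         swapped = False
--         for a, b in rules:
--             ia = pos.get(a, -1)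
--             ib = pos.get(b, -1)
--             if ib >= 0 and ia > ib:
--                 pages[ia], pages[ib] = pages[ib], pages[ia]
--                 flag = False
--                 swapped = True
--                 break
--         if not swapped:
--             break
--     return -1 if flag else int(pages[int(len(pages) / 2)])
-- ===== Notes on version B (the rewrite author's own statement) =====
-- stated objective: faster
-- what changed: Replaces A's recursion with per-rule pages.index/membership scans by an iterative while-loop that rebuilds a first-occurrence position dict once per pass and looks each rule up in O(1), so each pass costs O(P+R) instead of O(R*P).
import Mathlib
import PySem

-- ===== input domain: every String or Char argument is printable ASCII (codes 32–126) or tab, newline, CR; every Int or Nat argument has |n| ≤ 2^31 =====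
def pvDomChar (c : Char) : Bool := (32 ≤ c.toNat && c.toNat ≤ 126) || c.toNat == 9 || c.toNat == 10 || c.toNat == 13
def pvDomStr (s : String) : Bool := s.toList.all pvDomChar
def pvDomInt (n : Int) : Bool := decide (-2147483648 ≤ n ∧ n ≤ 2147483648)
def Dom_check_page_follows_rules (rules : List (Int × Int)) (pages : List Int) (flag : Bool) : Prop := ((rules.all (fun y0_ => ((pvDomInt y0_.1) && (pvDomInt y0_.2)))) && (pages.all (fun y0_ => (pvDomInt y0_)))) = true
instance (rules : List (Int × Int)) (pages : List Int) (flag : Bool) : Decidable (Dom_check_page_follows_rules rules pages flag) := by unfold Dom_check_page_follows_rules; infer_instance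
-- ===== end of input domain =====

-- B replaces A's recursion + per-rule `.index`/membership scans by an iterative loop with a
-- first-occurrence position dict rebuilt once per pass (O(P+R) per swap vs A's O(R·P)).
-- Both A and B mutate `pages` in place with the same swaps; the claim is about the return value.
-- Both Python versions can recurse/loop forever (cyclic rules); the ports carry a fuel of
-- pages.length² + 1, enough for every terminating run (each swap removes an inversion
-- w.r.t. a linear extension), and both return 0 on exhaustion — unreachable under Pre_.

-- ===== PORT A =====
-- correct_pages: t = pages[i0]; pages[i0] = pages[i1]; pages[i1] = t  (indices in range at all call sites)
def pvCorrectPages (i0 i1 : Int) (pages : List Int) : List Int :=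
  let t := PySem.List.pyGetD pages i0 0
  let pages1 := PySem.List.pySetD pages i0 (PySem.List.pyGetD pages i1 0)
  PySem.List.pySetD pages1 i1 t

-- find_middle_values: index = int(len/2) (exact: len/2 as Nat division), value = pages[index]
-- (pages[index] raises on empty pages — excluded by Pre_; total form with default 0)
def pvMiddle (pages : List Int) : Int :=
  PySem.List.pyGetD pages ((pages.length / 2 : Nat) : Int) 0

-- the `for r in rules` loop with early return-and-recurse; fuel spent per recursive call (= per swap)
def pvCheckLoopA (fuel : Nat) (rules : List (Int × Int)) (rest : List (Int × Int))
    (pages : List Int) (flag : Bool) : Int :=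
  match rest with
  | [] =>
    let val := pvMiddle pages
    if flag then -1 else val
  | r :: rs =>
    let pg1 : Int := if r.1 ∈ pages then (((PySem.List.index? pages r.1).getD 0 : Nat) : Int) else -1
    let pg2 : Int := if r.2 ∈ pages then (((PySem.List.index? pages r.2).getD 0 : Nat) : Int) else -1
    if pg1 > pg2 ∧ pg2 ≠ -1 ∧ pg1 ≠ -1 then
      match fuel with
      | 0 => 0
      | fuel' + 1 => pvCheckLoopA fuel' rules rules (pvCorrectPages pg1 pg2 pages) false
    else
      pvCheckLoopA fuel rules rs pages flag
  termination_by (fuel, rest)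

def check_page_follows_rules (rules : List (Int × Int)) (pages : List Int) (flag : Bool) : Int :=
  pvCheckLoopA (pages.length * pages.length + 1) rules rules pages flag

-- ===== PORT B =====
-- pos = {}; for i, p in enumerate(pages): if p not in pos: pos[p] = i
def pvBuildPos (pages : List Int) : PySem.Dict Int Int :=
  (PySem.List.enumerate pages).foldl
    (fun d ip => if d.contains ip.2 then d else d.insert ip.2 ip.1) PySem.Dict.empty

-- the `for a, b in rules` scan: first rule with ib >= 0 and ia > ib
def pvFindViol (pos : PySem.Dict Int Int) : List (Int × Int) → Option (Int × Int)
  | [] => none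
  | r :: rs =>
    let ia := pos.getD r.1 (-1)
    let ib := pos.getD r.2 (-1)
    if ib ≥ 0 ∧ ia > ib then some (ia, ib) else pvFindViol pos rs

-- pages[ia], pages[ib] = pages[ib], pages[ia]
def pvSwapB (pages : List Int) (ia ib : Int) : List Int :=
  let va := PySem.List.pyGetD pages ib 0
  let vb := PySem.List.pyGetD pages ia 0
  PySem.List.pySetD (PySem.List.pySetD pages ia va) ib vb

-- the `while True` loop; fuel spent per swap iteration
def pvLoopB (fuel : Nat) (rules : List (Int × Int)) (pages : List Int) (flag : Bool) : Int :=
  match pvFindViol (pvBuildPos pages) rules with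
  | some (ia, ib) =>
    match fuel with
    | 0 => 0
    | fuel' + 1 => pvLoopB fuel' rules (pvSwapB pages ia ib) false
  | none =>
    if flag then -1 else PySem.List.pyGetD pages ((pages.length / 2 : Nat) : Int) 0

def check_page_follows_rules_alt (rules : List (Int × Int)) (pages : List Int) (flag : Bool) : Int :=
  pvLoopB (pages.length * pages.length + 1) rules pages flag

-- ===== PRECONDITION & SPEC =====
-- rules with both endpoints in pages and distinct endpoints, as a directed graph
def pvRelevantEdges (rules : List (Int × Int)) (pages : List Int) : List (Int × Int) :=
  rules.filter (fun r => decide (r.1 ∈ pages) && decide (r.2 ∈ pages) && (r.1 != r.2))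

-- repeatedly delete source vertices (no incoming edge from a surviving vertex);
-- after |V| rounds the survivors are empty iff the graph is acyclic
def pvPrune : Nat → List Int → List (Int × Int) → List Int
  | 0, verts, _ => verts
  | n + 1, verts, edges =>
    pvPrune n (verts.filter (fun v => edges.any (fun e => e.2 == v && decide (e.1 ∈ verts)))) edges

-- Pre_ = exactly the inputs where Python A returns: pages nonempty (else find_middle_values
-- raises IndexError) and the relevant rules acyclic on the values present (else A's
-- swap-and-recurse never terminates and raises RecursionError).
def Pre_check_page_follows_rules (rules : List (Int × Int)) (pages : List Int) (flag : Bool) : Prop :=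
  pages ≠ [] ∧
  pvPrune (PySem.List.dedup pages).length (PySem.List.dedup pages) (pvRelevantEdges rules pages) = []

instance (rules : List (Int × Int)) (pages : List Int) (flag : Bool) : Decidable (Pre_check_page_follows_rules rules pages flag) := by unfold Pre_check_page_follows_rules; infer_instance

def pvWitness_check_page_follows_rules : (List (Int × Int)) × List Int × Bool :=
  ([(1, 2)], [2, 1, 3], true)

def Spec_check_page_follows_rules (rules : List (Int × Int)) (pages : List Int) (flag : Bool) (out : Int) : Prop := out = check_page_follows_rules_alt rules pages flag
instance (rules : List (Int × Int)) (pages : List Int) (flag : Bool) (out : Int) : Decidable (Spec_check_page_follows_rules rules pages flag out) := by unfold Spec_check_page_follows_rules; infer_instance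

-- ===== CLAIM (what is proved, stated in full; the proofs are below) =====
def Claim_equal_check_page_follows_rules : Prop := ∀ (rules : List (Int × Int)) (pages : List Int) (flag : Bool), Dom_check_page_follows_rules rules pages flag → Pre_check_page_follows_rules rules pages flag → Spec_check_page_follows_rules rules pages flag (check_page_follows_rules rules pages flag)


-- ===== LEMMAS AND PROOFS =====

-- the dict built by B's setdefault-style loop looks up to the first-occurrence index
theorem pvBuildPos_fold_getD (ps : List Int) :
    ∀ (d : PySem.Dict Int Int) (s : Int) (v : Int),
      ((PySem.List.enumerate ps s).foldl
        (fun d ip => if d.contains ip.2 then d else d.insert ip.2 ip.1) d).getD v (-1)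
      = if d.contains v then d.getD v (-1)
        else (match PySem.List.index? ps v with
              | some k => s + (k : Int)
              | none => -1) := by
  induction ps with
  | nil =>
    intro d s v
    by_cases hdv : d.contains v
    · simp [PySem.List.enumerate, hdv]
    · simp [PySem.List.enumerate, hdv,
        PySem.Dict.getD_of_not_contains d (-1) (Bool.not_eq_true _ ▸ hdv),
        PySem.List.index?_eq_idxOf?]
  | cons p ps ih =>
    intro d s v
    rw [PySem.List.enumerate_cons]
    simp only [List.foldl_cons]
    by_cases hdp : d.contains p
    · rw [if_pos hdp, ih d (s + 1) v]
      by_cases hdv : d.contains v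
      · simp [hdv]
      · have hvp : p ≠ v := by rintro rfl; exact absurd hdp (by simp [hdv])
        rw [if_neg hdv, if_neg hdv]
        rw [PySem.List.index?_cons_of_ne ps hvp]
        rcases PySem.List.index? ps v with _ | k
        · rfl
        · show s + 1 + (k : Int) = s + ((k : Int) + 1); ring
    · rw [if_neg hdp, ih (d.insert p s) (s + 1) v]
      by_cases hvp : v = p
      · subst hvp
        rw [if_pos (by simp),
          if_neg hdp, PySem.Dict.getD_insert_self, PySem.List.index?_cons_self]
        simp
      · rw [show (d.insert p s).contains v = d.contains v by
          simp [PySem.Dict.contains_insert, hvp]]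
        by_cases hdv : d.contains v
        · rw [if_pos hdv, if_pos hdv, PySem.Dict.getD_insert_of_ne d s (-1) hvp]
        · rw [if_neg hdv, if_neg hdv,
            PySem.List.index?_cons_of_ne ps (fun h => hvp h.symm)]
          rcases PySem.List.index? ps v with _ | k
          · rfl
          · show s + 1 + (k : Int) = s + ((k : Int) + 1); ring

-- hence B's lookup equals A's membership-guarded .index expression
theorem pvPos_eq (pages : List Int) (v : Int) :
    (pvBuildPos pages).getD v (-1)
      = if v ∈ pages then (((PySem.List.index? pages v).getD 0 : Nat) : Int) else -1 := by
  unfold pvBuildPos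
  rw [pvBuildPos_fold_getD pages PySem.Dict.empty 0 v]
  rw [if_neg (by simp [PySem.Dict.contains_empty])]
  by_cases hv : v ∈ pages
  · rw [if_pos hv]
    rcases Option.isSome_iff_exists.mp ((PySem.List.index?_isSome_iff pages v).mpr hv) with ⟨k, hk⟩
    rw [hk]; simp
  · rw [if_neg hv, (PySem.List.index?_eq_none_iff pages v).mpr hv]

-- the guarded index is -1 or a natural number
theorem pvPg_cases (pages : List Int) (v : Int) :
    (if v ∈ pages then (((PySem.List.index? pages v).getD 0 : Nat) : Int) else -1) = -1 ∨
    0 ≤ (if v ∈ pages then (((PySem.List.index? pages v).getD 0 : Nat) : Int) else -1) := by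
  by_cases hv : v ∈ pages
  · right; rw [if_pos hv]; positivity
  · left; rw [if_neg hv]

-- A's branch condition coincides with B's
theorem pvCond_iff (pg1 pg2 : Int)
    (h2 : pg2 = -1 ∨ 0 ≤ pg2) :
    (pg1 > pg2 ∧ pg2 ≠ -1 ∧ pg1 ≠ -1) ↔ (pg2 ≥ 0 ∧ pg1 > pg2) := by
  constructor
  · rintro ⟨hgt, hne2, _⟩
    rcases h2 with rfl | h2
    · exact absurd rfl hne2
    · exact ⟨h2, hgt⟩
  · rintro ⟨hge, hgt⟩
    exact ⟨hgt, by omega, by omega⟩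

-- the two swap helpers agree
theorem pvSwap_eq (pages : List Int) (ia ib : Int) :
    pvCorrectPages ia ib pages = pvSwapB pages ia ib := rfl

-- the state after one pass of B's while-loop body, as a function of the scan result
def pvStepB (fuel : Nat) (rules : List (Int × Int)) (pages : List Int) (flag : Bool) :
    Option (Int × Int) → Int
  | some (ia, ib) =>
    match fuel with
    | 0 => 0
    | fuel' + 1 => pvLoopB fuel' rules (pvSwapB pages ia ib) false
  | none => if flag then -1 else PySem.List.pyGetD pages ((pages.length / 2 : Nat) : Int) 0

-- A's inner scan over the remaining rules behaves as B's find-first-violation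
theorem pvScan_eq (allRules : List (Int × Int)) (fuel : Nat)
    (hmain : ∀ fuel' pages' flag', fuel' < fuel →
      pvCheckLoopA fuel' allRules allRules pages' flag' = pvLoopB fuel' allRules pages' flag') :
    ∀ (rest : List (Int × Int)) (pages : List Int) (flag : Bool),
      pvCheckLoopA fuel allRules rest pages flag
        = pvStepB fuel allRules pages flag (pvFindViol (pvBuildPos pages) rest) := by
  intro rest
  induction rest with
  | nil =>
    intro pages flag
    rw [pvCheckLoopA.eq_def]
    simp [pvFindViol, pvMiddle, pvStepB]
  | cons r rs ih =>
    intro pages flag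
    rw [pvCheckLoopA.eq_def]
    simp only [pvFindViol]
    set pg1 : Int := if r.1 ∈ pages then (((PySem.List.index? pages r.1).getD 0 : Nat) : Int) else -1 with hpg1
    set pg2 : Int := if r.2 ∈ pages then (((PySem.List.index? pages r.2).getD 0 : Nat) : Int) else -1 with hpg2
    have e1 : (pvBuildPos pages).getD r.1 (-1) = pg1 := pvPos_eq pages r.1
    have e2 : (pvBuildPos pages).getD r.2 (-1) = pg2 := pvPos_eq pages r.2
    have hc : (pg1 > pg2 ∧ pg2 ≠ -1 ∧ pg1 ≠ -1) ↔ (pg2 ≥ 0 ∧ pg1 > pg2) := by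
      apply pvCond_iff
      rw [hpg2]; exact pvPg_cases pages r.2
    simp only [e1, e2]
    by_cases hcond : pg1 > pg2 ∧ pg2 ≠ -1 ∧ pg1 ≠ -1
    · rw [if_pos hcond, if_pos (hc.mp hcond)]
      cases fuel with
      | zero => rfl
      | succ fuel' =>
        show pvCheckLoopA fuel' allRules allRules (pvCorrectPages pg1 pg2 pages) false = _
        rw [hmain fuel' (pvCorrectPages pg1 pg2 pages) false (Nat.lt_succ_self _), pvSwap_eq]
        rfl
    · rw [if_neg hcond, if_neg (fun h => hcond (hc.mpr h))]
      exact ih pages flag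

-- the two fueled loops agree
theorem pvLoop_eq (rules : List (Int × Int)) :
    ∀ (fuel : Nat) (pages : List Int) (flag : Bool),
      pvCheckLoopA fuel rules rules pages flag = pvLoopB fuel rules pages flag := by
  intro fuel
  induction fuel using Nat.strong_induction_on with
  | _ fuel ih =>
    intro pages flag
    rw [pvScan_eq rules fuel (fun f' p fl h => ih f' h p fl) rules pages flag]
    rw [pvLoopB.eq_def]
    rcases pvFindViol (pvBuildPos pages) rules with _ | ⟨ia, ib⟩
    · rfl
    · cases fuel <;> rfl

-- ===== VERDICT (by name: the statement is the Claim_ definition above) =====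
theorem check_page_follows_rules_spec : Claim_equal_check_page_follows_rules := by
  intro rules pages flag _ _
  unfold Spec_check_page_follows_rules check_page_follows_rules check_page_follows_rules_alt
  exact pvLoop_eq rules (pages.length * pages.length + 1) pages flag
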